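-- pv_equiv track=rewrite | github.com/Ynadroid/AdventOfCode | adventofcode_day11.py | checkPasswordRule3
-- ===== SOURCE A (Python) =====
-- def checkPasswordRule3(array):
-- 	pos = 0
-- 	count = 0
-- 	while pos < len(array)-1:
-- 		if array[pos] == array[pos+1]:
-- 			count += 1
-- 			pos += 1
-- 		pos += 1
--
-- 	return (count >= 2)
-- ===== SOURCE B (Python) =====
-- from itertools import groupby
--
-- def checkPasswordRule3(array):
--     total = 0
--     for _, g in groupby(array):
--         total += len(list(g)) // 2
--     return total >= 2
-- ===== Notes on version B (the rewrite author's own statement) =====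
-- stated objective: idiomatic
-- what changed: Replaced the index-advancing greedy scan by itertools.groupby run-length grouping, summing floor(L/2) non-overlapping pairs per maximal run.
import Mathlib
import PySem

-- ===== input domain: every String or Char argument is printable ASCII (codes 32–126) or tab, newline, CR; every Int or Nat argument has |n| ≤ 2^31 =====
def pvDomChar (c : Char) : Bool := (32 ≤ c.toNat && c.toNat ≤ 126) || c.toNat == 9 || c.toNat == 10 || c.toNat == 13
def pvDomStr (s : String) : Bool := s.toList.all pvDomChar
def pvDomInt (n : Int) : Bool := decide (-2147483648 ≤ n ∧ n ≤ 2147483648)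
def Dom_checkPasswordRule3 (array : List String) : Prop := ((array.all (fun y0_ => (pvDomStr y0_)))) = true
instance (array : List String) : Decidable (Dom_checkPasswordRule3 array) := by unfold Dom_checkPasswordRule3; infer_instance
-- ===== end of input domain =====

-- B replaces A's index-advancing greedy scan by run-length grouping summing L/2 pairs per maximal run (same behaviour, idiomatic decomposition).

-- ===== PORT A =====
-- the while loop of A: pos advances by 2 on an equal adjacent pair (counting it), else by 1
def checkPasswordRule3Loop (array : List String) (pos count : Nat) : Nat :=
  if h : pos < array.length - 1 then
    if array.getD pos "" == array.getD (pos + 1) "" then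
      checkPasswordRule3Loop array (pos + 2) (count + 1)
    else
      checkPasswordRule3Loop array (pos + 1) count
  else count
termination_by array.length - pos
decreasing_by all_goals omega

def checkPasswordRule3 (array : List String) : Bool :=
  decide (checkPasswordRule3Loop array 0 0 ≥ 2)

-- ===== PORT B =====
-- groupby: split off the maximal leading run, add (run length)/2, recurse on the rest
def checkPasswordRule3RunSum : List String → Nat
  | [] => 0
  | x :: xs =>
    ((xs.takeWhile (fun y => y == x)).length + 1) / 2 +
      checkPasswordRule3RunSum (xs.drop (xs.takeWhile (fun y => y == x)).length)
termination_by l => l.length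
decreasing_by
  have h := (xs.takeWhile_sublist (fun y => y == x)).length_le
  simp only [List.length_drop, List.length_cons]
  omega

def checkPasswordRule3_alt (array : List String) : Bool :=
  decide (checkPasswordRule3RunSum array ≥ 2)

-- ===== PRECONDITION & SPEC =====
def Spec_checkPasswordRule3 (array : List String) (out : Bool) : Prop := out = checkPasswordRule3_alt array
instance (array : List String) (out : Bool) : Decidable (Spec_checkPasswordRule3 array out) := by unfold Spec_checkPasswordRule3; infer_instance

-- ===== CLAIM (what is proved, stated in full; the proofs are below) =====
def Claim_equal_checkPasswordRule3 : Prop := ∀ (array : List String), Dom_checkPasswordRule3 array → Spec_checkPasswordRule3 array (checkPasswordRule3 array)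

-- ===== LEMMAS AND PROOFS =====

-- the greedy pair count as a structural recursion over the list
def pvGreedy : List String → Nat
  | [] => 0
  | [_] => 0
  | x :: y :: t => if x == y then 1 + pvGreedy t else pvGreedy (y :: t)

-- A's loop equals count + greedy pairs of the suffix from pos
theorem loop_eq_greedy (array : List String) (pos count : Nat) :
    checkPasswordRule3Loop array pos count = count + pvGreedy (array.drop pos) := by
  fun_induction checkPasswordRule3Loop array pos count with
  | case1 pos count h heq ih =>
    have h1 : pos < array.length := by omega
    have h2 : pos + 1 < array.length := by omega
    have hd : array.drop pos = array[pos] :: array[pos+1] :: array.drop (pos + 2) := by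
      rw [List.drop_eq_getElem_cons h1, List.drop_eq_getElem_cons h2]
    rw [ih, hd, pvGreedy]
    have : array[pos] == array[pos+1] := by
      simpa [List.getD, List.getElem?_eq_getElem, h1, h2] using heq
    simp [this]
    omega
  | case2 pos count h heq ih =>
    have h1 : pos < array.length := by omega
    have h2 : pos + 1 < array.length := by omega
    have hd : array.drop pos = array[pos] :: array[pos+1] :: array.drop (pos + 2) := by
      rw [List.drop_eq_getElem_cons h1, List.drop_eq_getElem_cons h2]
    have hd1 : array.drop (pos + 1) = array[pos+1] :: array.drop (pos + 2) := by
      rw [List.drop_eq_getElem_cons h2]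
    rw [ih, hd, hd1, pvGreedy]
    have : ¬ (array[pos] == array[pos+1]) = true := by
      simpa [List.getD, List.getElem?_eq_getElem, h1, h2] using heq
    simp [this]
  | case3 pos count h =>
    have : pvGreedy (array.drop pos) = 0 := by
      rcases hd : array.drop pos with _ | ⟨a, _ | ⟨b, t⟩⟩
      · rfl
      · rfl
      · exfalso
        have := congrArg List.length hd
        simp [List.length_drop] at this
        omega
    omega

-- greedy pair count = sum of L/2 over maximal runs
theorem greedy_eq_runSum (l : List String) : pvGreedy l = checkPasswordRule3RunSum l := by
  induction l using pvGreedy.induct with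
  | case1 => simp [pvGreedy, checkPasswordRule3RunSum]
  | case2 x => simp [pvGreedy, checkPasswordRule3RunSum]
  | case3 x y t heq ih =>
    have hy : y = x := by have h := (by simpa using heq : x = y); exact h.symm
    subst hy
    rw [pvGreedy, if_pos heq]
    simp only [checkPasswordRule3RunSum, List.takeWhile_cons, beq_self_eq_true, if_true,
      List.length_cons, List.drop_succ_cons]
    cases t with
    | nil => simp [pvGreedy, checkPasswordRule3RunSum]
    | cons z u =>
      by_cases hz : (z == y) = true
      · have hzx : z = y := by simpa using hz
        subst hzx
        simp only [checkPasswordRule3RunSum] at ih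
        simp only [List.takeWhile_cons, beq_self_eq_true, if_true, List.length_cons,
          List.drop_succ_cons]
        rw [ih]
        omega
      · simp only [List.takeWhile_cons, hz]
        simp only [Bool.false_eq_true, if_false, List.length_nil, List.drop_zero]
        rw [ih]
  | case4 x y t heq ih =>
    have hne : x ≠ y := by simpa using heq
    have h2 : (y == x) = false := beq_eq_false_iff_ne.mpr (Ne.symm hne)
    rw [pvGreedy, if_neg heq]
    simp only [checkPasswordRule3RunSum, List.takeWhile_cons, h2]
    simp only [Bool.false_eq_true, if_false, List.length_nil, List.drop_zero]
    rw [ih]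
    simp

-- ===== VERDICT (by name: the statement is the Claim_ definition above) =====
theorem checkPasswordRule3_spec : Claim_equal_checkPasswordRule3 := by
  intro array _
  unfold Spec_checkPasswordRule3 checkPasswordRule3 checkPasswordRule3_alt
  rw [loop_eq_greedy, greedy_eq_runSum]
  simp
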